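-- pv_equiv track=rewrite | github.com/liujunhao228/poetry-annotator | src/emotion_classification/example_plugin.py | get_emotion_display_info
-- ===== SOURCE A (Python) =====
-- from typing import Dict, Any, List, Optional
--
-- EXAMPLE_EMOTION_CATEGORIES = {
--     "01": {
--         "name_zh": "积极情感",
--         "name_en": "Positive Emotion",
--         "categories": [
--             {"id": "01.01", "name_zh": "喜悦", "name_en": "Joy"},
--             {"id": "01.02", "name_zh": "热爱", "name_en": "Love"},
--             {"id": "01.03", "name_zh": "崇敬", "name_en": "Reverence"},
--             {"id": "01.04", "name_zh": "赞赏", "name_en": "Appreciation"},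
--             {"id": "01.05", "name_zh": "愉悦", "name_en": "Pleasure"}
--         ]
--     },
--     "02": {
--         "name_zh": "消极情感",
--         "name_en": "Negative Emotion",
--         "categories": [
--             {"id": "02.01", "name_zh": "悲伤", "name_en": "Sadness"},
--             {"id": "02.02", "name_zh": "愤怒", "name_en": "Anger"},
--             {"id": "02.03", "name_zh": "恐惧", "name_en": "Fear"},
--             {"id": "02.04", "name_zh": "厌恶", "name_en": "Disgust"},
--             {"id": "02.05", "name_zh": "焦虑", "name_en": "Anxiety"}
--         ]
--     }
-- }
--
-- def get_emotion_display_info(emotion_id: str) -> Dict[str, str]: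
--     """
--     根据情感ID获取用于界面显示的信息。
--
--     :param emotion_id: 情感的唯一ID，例如 "01.05"。
--     :return: 包含 'id' 和 'name' 的字典，例如 {'id': '01.05', 'name': '01.05 愉悦'}。
--              如果ID无效，则 'name' 为 '未知情感'。
--     """
--     # 在插件提供的分类中查找指定ID的情感
--     for primary_id, primary_data in EXAMPLE_EMOTION_CATEGORIES.items():
--         # 检查一级分类
--         if primary_id == emotion_id:
--             name_zh = primary_data.get('name_zh', '')
--             return {'id': emotion_id, 'name': f"{emotion_id} {name_zh}"}
--
--         # 检查二级分类
--         for secondary in primary_data.get('categories', []):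
--             if secondary.get('id') == emotion_id:
--                 name_zh = secondary.get('name_zh', '')
--                 return {'id': emotion_id, 'name': f"{emotion_id} {name_zh}"}
--
--     # 如果未找到，返回未知情感
--     return {'id': emotion_id, 'name': f"{emotion_id} 未知情感"}
-- ===== SOURCE B (Python) =====
-- from typing import Dict, Any, List, Optional
--
-- EXAMPLE_EMOTION_CATEGORIES = {
--     "01": {
--         "name_zh": "积极情感",
--         "name_en": "Positive Emotion",
--         "categories": [
--             {"id": "01.01", "name_zh": "喜悦", "name_en": "Joy"},
--             {"id": "01.02", "name_zh": "热爱", "name_en": "Love"},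
--             {"id": "01.03", "name_zh": "崇敬", "name_en": "Reverence"},
--             {"id": "01.04", "name_zh": "赞赏", "name_en": "Appreciation"},
--             {"id": "01.05", "name_zh": "愉悦", "name_en": "Pleasure"}
--         ]
--     },
--     "02": {
--         "name_zh": "消极情感",
--         "name_en": "Negative Emotion",
--         "categories": [
--             {"id": "02.01", "name_zh": "悲伤", "name_en": "Sadness"},
--             {"id": "02.02", "name_zh": "愤怒", "name_en": "Anger"},
--             {"id": "02.03", "name_zh": "恐惧", "name_en": "Fear"},
--             {"id": "02.04", "name_zh": "厌恶", "name_en": "Disgust"},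
--             {"id": "02.05", "name_zh": "焦虑", "name_en": "Anxiety"}
--         ]
--     }
-- }
--
-- # Flat id -> name_zh index built once at module load; lookup replaces the nested scan.
-- FLAT: Dict[str, str] = {}
-- for _pid, _data in EXAMPLE_EMOTION_CATEGORIES.items():
--     FLAT[_pid] = _data.get('name_zh', '')
--     for _sec in _data.get('categories', []):
--         FLAT[_sec.get('id')] = _sec.get('name_zh', '')
--
--
-- def get_emotion_display_info(emotion_id: str) -> Dict[str, str]:
--     name = FLAT.get(emotion_id)
--     if name is None:
--         return {'id': emotion_id, 'name': f"{emotion_id} 未知情感"}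
--     return {'id': emotion_id, 'name': f"{emotion_id} {name}"}
-- ===== Notes on version B (the rewrite author's own statement) =====
-- stated objective: idiomatic
-- what changed: Replaced the nested scan over primary and secondary categories by a flat id->name_zh dict built once at module load, so the function body is a single dict lookup.
import Mathlib
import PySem

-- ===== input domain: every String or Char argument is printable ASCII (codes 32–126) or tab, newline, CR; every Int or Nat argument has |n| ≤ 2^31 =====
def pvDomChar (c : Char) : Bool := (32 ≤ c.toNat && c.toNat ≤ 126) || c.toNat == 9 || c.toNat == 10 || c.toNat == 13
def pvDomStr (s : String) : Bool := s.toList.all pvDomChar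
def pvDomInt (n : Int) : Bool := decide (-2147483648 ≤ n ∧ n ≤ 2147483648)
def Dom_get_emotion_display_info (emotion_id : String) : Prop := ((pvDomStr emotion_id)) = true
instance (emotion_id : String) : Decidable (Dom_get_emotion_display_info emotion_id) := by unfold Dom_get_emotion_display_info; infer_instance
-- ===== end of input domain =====

-- B replaces A's nested scan with a flat id -> name_zh index built once and a single lookup (idiomatic, O(1) per call).

-- ===== PORT A =====
-- EXAMPLE_EMOTION_CATEGORIES as (primary_id, name_zh, [(id, name_zh)]) in insertion order
def pvCategories : List (String × String × List (String × String)) :=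
  [ ("01", "积极情感",
      [("01.01", "喜悦"), ("01.02", "热爱"), ("01.03", "崇敬"), ("01.04", "赞赏"), ("01.05", "愉悦")]),
    ("02", "消极情感",
      [("02.01", "悲伤"), ("02.02", "愤怒"), ("02.03", "恐惧"), ("02.04", "厌恶"), ("02.05", "焦虑")]) ]

-- inner loop: for secondary in primary_data['categories']
def pvSecLoop (emotion_id : String) : List (String × String) → Option (List (String × String))
  | [] => none
  | (sid, nz) :: rest =>
      if sid == emotion_id then some [("id", emotion_id), ("name", emotion_id ++ " " ++ nz)]
      else pvSecLoop emotion_id rest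

-- outer loop: for primary_id, primary_data in EXAMPLE_EMOTION_CATEGORIES.items()
def pvPrimLoop (emotion_id : String) : List (String × String × List (String × String)) → Option (List (String × String))
  | [] => none
  | (pid, nz, cats) :: rest =>
      if pid == emotion_id then some [("id", emotion_id), ("name", emotion_id ++ " " ++ nz)]
      else match pvSecLoop emotion_id cats with
           | some r => some r
           | none => pvPrimLoop emotion_id rest

def get_emotion_display_info (emotion_id : String) : List (String × String) :=
  match pvPrimLoop emotion_id pvCategories with
  | some r => r
  | none => [("id", emotion_id), ("name", emotion_id ++ " 未知情感")]

-- ===== PORT B =====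
-- FLAT built once: for each primary add pid -> name_zh, then each secondary id -> name_zh
def pvFLAT : PySem.Dict String String :=
  pvCategories.foldl
    (fun d p =>
      (p.2.2.foldl (fun d' s => d'.insert s.1 s.2) (d.insert p.1 p.2.1)))
    PySem.Dict.empty

def get_emotion_display_info_alt (emotion_id : String) : List (String × String) :=
  match pvFLAT.get? emotion_id with
  | none => [("id", emotion_id), ("name", emotion_id ++ " 未知情感")]
  | some name => [("id", emotion_id), ("name", emotion_id ++ " " ++ name)]

-- ===== PRECONDITION & SPEC =====
def Spec_get_emotion_display_info (emotion_id : String) (out : List (String × String)) : Prop := out = get_emotion_display_info_alt emotion_id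
instance (emotion_id : String) (out : List (String × String)) : Decidable (Spec_get_emotion_display_info emotion_id out) := by unfold Spec_get_emotion_display_info; infer_instance

-- ===== CLAIM (what is proved, stated in full; the proofs are below) =====
def Claim_equal_get_emotion_display_info : Prop := ∀ (emotion_id : String), Dom_get_emotion_display_info emotion_id → Spec_get_emotion_display_info emotion_id (get_emotion_display_info emotion_id)

-- ===== LEMMAS AND PROOFS =====

-- ===== VERDICT (by name: the statement is the Claim_ definition above) =====
theorem get_emotion_display_info_spec : Claim_equal_get_emotion_display_info := by
  intro e _
  unfold Spec_get_emotion_display_info get_emotion_display_info get_emotion_display_info_alt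
  by_cases h1 : "01" = e; · subst h1; decide
  by_cases h2 : "02" = e; · subst h2; decide
  by_cases h3 : "01.01" = e; · subst h3; decide
  by_cases h4 : "01.02" = e; · subst h4; decide
  by_cases h5 : "01.03" = e; · subst h5; decide
  by_cases h6 : "01.04" = e; · subst h6; decide
  by_cases h7 : "01.05" = e; · subst h7; decide
  by_cases h8 : "02.01" = e; · subst h8; decide
  by_cases h9 : "02.02" = e; · subst h9; decide
  by_cases h10 : "02.03" = e; · subst h10; decide
  by_cases h11 : "02.04" = e; · subst h11; decide
  by_cases h12 : "02.05" = e; · subst h12; decide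
  simp [pvPrimLoop, pvSecLoop, pvCategories, pvFLAT,
        PySem.Dict.insert, PySem.Dict.empty, PySem.Dict.get?,
        h1, h2, h3, h4, h5, h6, h7, h8, h9, h10, h11, h12]
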